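-- pv_equiv track=rewrite | github.com/SR2k/leetcode | 544.输出比赛匹配对.py | findContestMatch
-- ===== SOURCE A (Python) =====
-- def findContestMatch(n: int) -> str:
--     groups = [(i, str(i)) for i in range(1, n + 1)]
--
--     while len(groups) > 1:
--         next_groups = []
--         len_groups = len(groups)
--
--         for i in range(len_groups // 2):
--             a, b = groups[i], groups[-(i + 1)]
--             next_groups.append((max(a[0], b[0]), f"({a[1]},{b[1]})"))
--
--         groups = next_groups
--
--     return groups[0][1]
-- ===== SOURCE B (Python) =====
-- def findContestMatch(n: int) -> str:
--     def reduce(teams):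
--         if len(teams) <= 1:
--             return teams[0]
--         return reduce([f"({teams[i]},{teams[-(i + 1)]})" for i in range(len(teams) // 2)])
--
--     return reduce([str(i) for i in range(1, n + 1)])
-- ===== Notes on version B (the rewrite author's own statement) =====
-- stated objective: simpler
-- what changed: Replaces the round-by-round while loop over (max-seed, label) tuples with a recursive reduce over plain string labels, dropping the unused max-seed bookkeeping entirely.
import Mathlib
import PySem

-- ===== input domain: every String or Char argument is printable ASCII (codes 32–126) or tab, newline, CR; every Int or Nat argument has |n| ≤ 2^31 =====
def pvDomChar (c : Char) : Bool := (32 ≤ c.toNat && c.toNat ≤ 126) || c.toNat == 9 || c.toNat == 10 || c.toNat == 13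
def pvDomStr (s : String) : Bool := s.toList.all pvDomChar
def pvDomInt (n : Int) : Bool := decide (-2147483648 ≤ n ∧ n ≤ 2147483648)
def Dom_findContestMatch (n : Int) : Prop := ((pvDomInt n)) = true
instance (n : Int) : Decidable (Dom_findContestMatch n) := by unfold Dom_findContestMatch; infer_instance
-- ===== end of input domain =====

-- B replaces A's round-by-round while loop over (max-seed, label) tuples with a recursive
-- reduce over plain string labels, dropping the unused max-seed bookkeeping (objective: simpler).

-- ===== PORT A =====
-- one round of A's while loop: the inner 'for i in range(len_groups // 2)' building next_groups
def aRound (groups : List (Int × String)) : List (Int × String) :=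
  (PySem.List.pyRange 0 (PySem.Int.floordiv (PySem.List.len groups) 2) 1).foldl
    (fun nextGroups i =>
      let a := PySem.List.pyGetD groups i ((0 : Int), "")
      let b := PySem.List.pyGetD groups (-(i + 1)) ((0 : Int), "")
      nextGroups ++ [(max a.1 b.1, "(" ++ a.2 ++ "," ++ b.2 ++ ")")]) []

lemma pyRange_half_length (m : Nat) :
    (PySem.List.pyRange 0 (PySem.Int.floordiv (m : Int) 2)).length = m / 2 := by
  rw [PySem.Int.floordiv_eq_ediv_of_pos (by omega),
      show ((m : Int)) / 2 = ((m / 2 : Nat) : Int) from by omega,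
      PySem.List.pyRange_zero_natCast]
  simp

lemma aRound_length (groups : List (Int × String)) :
    (aRound groups).length = groups.length / 2 := by
  simp only [aRound, PySem.List.foldl_append_singleton_eq_map, List.nil_append,
    List.length_map, PySem.List.len_eq]
  exact pyRange_half_length _

-- A's 'while len(groups) > 1'
def aLoop (groups : List (Int × String)) : List (Int × String) :=
  if 1 < PySem.List.len groups then aLoop (aRound groups) else groups
termination_by groups.length
decreasing_by
  simp only [PySem.List.len_eq] at *
  rw [aRound_length]
  omega

def findContestMatch (n : Int) : String :=
  -- groups[0][1]; pyGetD's default only guards totality (Pre_ keeps the list nonempty)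
  (PySem.List.pyGetD
    (aLoop ((PySem.List.pyRange 1 (n + 1) 1).map (fun i => (i, PySem.Int.toStr i))))
    0 ((0 : Int), "")).2

-- ===== PORT B =====
-- Source B's recursive reduce over string labels
def bReduce (teams : List String) : String :=
  if 1 < PySem.List.len teams then
    bReduce ((PySem.List.pyRange 0 (PySem.Int.floordiv (PySem.List.len teams) 2) 1).map
      (fun i => "(" ++ PySem.List.pyGetD teams i "" ++ "," ++
                PySem.List.pyGetD teams (-(i + 1)) "" ++ ")"))
  else
    PySem.List.pyGetD teams 0 ""
termination_by teams.length
decreasing_by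
  simp only [PySem.List.len_eq] at *
  rw [List.length_map, pyRange_half_length]
  omega

def findContestMatch_alt (n : Int) : String :=
  bReduce ((PySem.List.pyRange 1 (n + 1) 1).map (fun i => PySem.Int.toStr i))

-- ===== PRECONDITION & SPEC =====
-- Pre_ excludes n ≤ 0, where A's groups[0] raises IndexError (B's teams[0] raises too).
def Pre_findContestMatch (n : Int) : Prop := 1 ≤ n
instance (n : Int) : Decidable (Pre_findContestMatch n) := by unfold Pre_findContestMatch; infer_instance
def pvWitness_findContestMatch : Int := (3)

def Spec_findContestMatch (n : Int) (out : String) : Prop := out = findContestMatch_alt n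
instance (n : Int) (out : String) : Decidable (Spec_findContestMatch n out) := by unfold Spec_findContestMatch; infer_instance

-- ===== CLAIM (what is proved, stated in full; the proofs are below) =====
def Claim_equal_findContestMatch : Prop := ∀ (n : Int), Dom_findContestMatch n → Pre_findContestMatch n → Spec_findContestMatch n (findContestMatch n)

-- ===== LEMMAS AND PROOFS =====

-- projecting A's round onto labels gives exactly B's round
lemma snd_aRound (groups : List (Int × String)) :
    (aRound groups).map Prod.snd =
      (PySem.List.pyRange 0 (PySem.Int.floordiv ((groups.length : Int)) 2) 1).map
        (fun i => "(" ++ PySem.List.pyGetD (groups.map Prod.snd) i "" ++ "," ++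
                  PySem.List.pyGetD (groups.map Prod.snd) (-(i + 1)) "" ++ ")") := by
  simp only [aRound, PySem.List.foldl_append_singleton_eq_map, List.nil_append, List.map_map,
    PySem.List.len_eq]
  refine List.map_congr_left (fun i _ => ?_)
  have h1 := PySem.List.pyGetD_map Prod.snd groups i ((0 : Int), "")
  have h2 := PySem.List.pyGetD_map Prod.snd groups (-(i + 1)) ((0 : Int), "")
  simp only [Function.comp_apply]
  rw [show (Prod.snd ((0 : Int), "") : String) = "" from rfl] at h1 h2
  rw [h1, h2]

-- A's loop followed by groups[0][1] equals B's reduce on the label projection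
lemma aLoop_eq_bReduce (groups : List (Int × String)) :
    (PySem.List.pyGetD (aLoop groups) 0 ((0 : Int), "")).2 = bReduce (groups.map Prod.snd) := by
  induction hg : groups.length using Nat.strong_induction_on generalizing groups with
  | _ N ih =>
    rw [aLoop, bReduce]
    simp only [PySem.List.len_eq, List.length_map]
    by_cases h : 1 < (groups.length : Int)
    · rw [if_pos h, if_pos h]
      rw [← snd_aRound]
      subst hg
      exact ih (aRound groups).length (by rw [aRound_length]; omega) _ rfl
    · rw [if_neg h, if_neg h]
      have := PySem.List.pyGetD_map Prod.snd groups 0 ((0 : Int), "")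
      rw [show (Prod.snd ((0 : Int), "") : String) = "" from rfl] at this
      exact this.symm

-- ===== VERDICT (by name: the statement is the Claim_ definition above) =====
theorem findContestMatch_spec : Claim_equal_findContestMatch := by
  intro n _ _
  unfold Spec_findContestMatch findContestMatch findContestMatch_alt
  rw [aLoop_eq_bReduce, List.map_map]
  rfl
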